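-- pv_equiv track=rewrite | github.com/graevsky/ITMO | 2COURSE/2SEM/Csa/lab3/source/translator.py | preprocess_commands
-- ===== SOURCE A (Python) =====
-- def preprocess_commands(commands):
--     preprocessed = []
--     strings = {}
--     string_address = 0
--
--     i = 0
--     while i < len(commands):
--         command = commands[i]
--         if command == "do":
--             if i < 2:
--                 raise ValueError("Invalid 'do' loop syntax")
--             preprocessed.pop()
--             preprocessed.pop()
--             preprocessed.append(f"{commands[i - 2]} {commands[i - 1]} do")
--         elif command.startswith('."'):
--             string_literal = command[2:]
--             if string_literal.endswith('"'):
--                 string_literal = string_literal[:-1]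
--             else:
--                 while i + 1 < len(commands) and not commands[i + 1].endswith('"'):
--                     string_literal += ' ' + commands[i + 1]
--                     i += 1
--                 if i + 1 < len(commands) and commands[i + 1].endswith('"'):
--                     string_literal += ' ' + commands[i + 1][:-1]
--                     i += 1
--
--             string_length = len(string_literal)
--             strings[string_address] = [string_length] + [ord(char) for char in string_literal]
--             preprocessed.append(f'PSTR {string_address}')
--             string_address += string_length + 1
--         else:
--             preprocessed.append(command)
--         i += 1
--     return preprocessed, strings
-- ===== SOURCE B (Python) =====
-- def _collect_literal(commands, i, head):
--     # Return (literal, index of the last token the literal consumed).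
--     n = len(commands)
--     if head.endswith('"'):
--         return head[:-1], i
--     j = i + 1
--     while j < n and not commands[j].endswith('"'):
--         j += 1
--     if j < n:
--         return ' '.join([head] + commands[i + 1:j] + [commands[j][:-1]]), j
--     return ' '.join([head] + commands[i + 1:]), n - 1
--
--
-- def preprocess_commands(commands):
--     preprocessed = []
--     strings = {}
--     string_address = 0
--     i = 0
--     while i < len(commands):
--         command = commands[i]
--         if command == "do":
--             if i < 2:
--                 raise ValueError("Invalid 'do' loop syntax")
--             preprocessed.pop()
--             preprocessed.pop()
--             preprocessed.append(f"{commands[i - 2]} {commands[i - 1]} do")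
--         elif command.startswith('."'):
--             literal, i = _collect_literal(commands, i, command[2:])
--             strings[string_address] = [len(literal)] + [ord(ch) for ch in literal]
--             preprocessed.append(f'PSTR {string_address}')
--             string_address += len(literal) + 1
--         else:
--             preprocessed.append(command)
--         i += 1
--     return preprocessed, strings
-- ===== Notes on version B (the rewrite author's own statement) =====
-- stated objective: alternative
-- what changed: The '."' string-literal branch no longer accumulates the literal token by token in an inner while loop with a trailing-quote fixup: a separate helper first locates the closing token (first later token ending in '"'), then builds the literal in one slice-and-join, returning the new scan position; the 'do' branch is unchanged and is proved equal on all non-raising inputs.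
import Mathlib
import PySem

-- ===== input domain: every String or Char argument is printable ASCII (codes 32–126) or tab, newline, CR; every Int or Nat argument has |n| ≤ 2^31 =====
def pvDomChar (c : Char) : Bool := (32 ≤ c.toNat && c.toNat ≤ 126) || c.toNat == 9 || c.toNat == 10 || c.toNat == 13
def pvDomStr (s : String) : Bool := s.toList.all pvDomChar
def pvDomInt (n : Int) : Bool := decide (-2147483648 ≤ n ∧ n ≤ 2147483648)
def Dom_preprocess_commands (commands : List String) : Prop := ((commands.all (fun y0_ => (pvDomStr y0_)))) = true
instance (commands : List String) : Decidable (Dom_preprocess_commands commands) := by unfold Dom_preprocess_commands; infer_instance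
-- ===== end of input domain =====

-- B replaces A's token-by-token literal accumulation (inner while + trailing-quote fixup) by a
-- locate-the-closing-token scan followed by one slice-and-join, in a separate helper (objective: alternative).
-- Both while loops are ported with a structural fuel counter (fuel = commands.length, enough for every
-- scan, since the position strictly increases each step); the fuel only makes the recursion structural.

-- ===== PORT A =====

-- inner while loop of the '."' branch: consumes following tokens while they do not end with '"'
def pcA_inner (commands : List String) : Nat → Nat → List Char → List Char × Nat
  | 0, i, lit => (lit, i)
  | fuel + 1, i, lit =>
    if i + 1 < commands.length ∧
        ¬ PySem.Chars.endswith (commands.getD (i + 1) "").toList ['\"'] = true then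
      pcA_inner commands fuel (i + 1) (lit ++ ' ' :: (commands.getD (i + 1) "").toList)
    else (lit, i)

def pcA_loop (commands : List String) : Nat → Nat → List String →
    PySem.Dict Int (List Int) → Int → List String × List (Int × List Int)
  | 0, _, pre, strs, _ => (pre, strs.items)
  | fuel + 1, i, pre, strs, addr =>
    if i < commands.length then
      let command := commands.getD i ""
      if command == "do" then
        -- Python raises here when i < 2 (ValueError) or when fewer than two results were
        -- produced (pop → IndexError); Pre_ excludes exactly those inputs, so the port
        -- totalises the two pops with dropLast / getD
        pcA_loop commands fuel (i + 1)
          (pre.dropLast.dropLast ++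
            [String.ofList ((commands.getD (i - 2) "").toList ++ ' ' ::
              (commands.getD (i - 1) "").toList ++ [' ', 'd', 'o'])])
          strs addr
      else if PySem.Chars.startswith command.toList ['.', '\"'] then
        let lit0 := PySem.List.slice command.toList (some 2) none
        if PySem.Chars.endswith lit0 ['\"'] then
          let lit := PySem.List.slice lit0 none (some (-1))
          pcA_loop commands fuel (i + 1)
            (pre ++ [String.ofList (['P', 'S', 'T', 'R', ' '] ++ PySem.Int.toChars addr)])
            (strs.insert addr ((lit.length : Int) :: lit.map (fun c => (c.toNat : Int))))
            (addr + (lit.length : Int) + 1)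
        else
          let r := pcA_inner commands commands.length i lit0
          if r.2 + 1 < commands.length ∧
              PySem.Chars.endswith (commands.getD (r.2 + 1) "").toList ['\"'] = true then
            let lit := r.1 ++ ' ' :: PySem.List.slice (commands.getD (r.2 + 1) "").toList none (some (-1))
            pcA_loop commands fuel (r.2 + 1 + 1)
              (pre ++ [String.ofList (['P', 'S', 'T', 'R', ' '] ++ PySem.Int.toChars addr)])
              (strs.insert addr ((lit.length : Int) :: lit.map (fun c => (c.toNat : Int))))
              (addr + (lit.length : Int) + 1)
          else
            pcA_loop commands fuel (r.2 + 1)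
              (pre ++ [String.ofList (['P', 'S', 'T', 'R', ' '] ++ PySem.Int.toChars addr)])
              (strs.insert addr ((r.1.length : Int) :: r.1.map (fun c => (c.toNat : Int))))
              (addr + (r.1.length : Int) + 1)
      else pcA_loop commands fuel (i + 1) (pre ++ [command]) strs addr
    else (pre, strs.items)

def preprocess_commands (commands : List String) : List String × (List (Int × List Int)) :=
  pcA_loop commands commands.length 0 [] PySem.Dict.empty 0

-- ===== PORT B =====

-- helper of _collect_literal: first index j ≥ start whose token ends with '"', else len(commands)
def pcB_find (commands : List String) : Nat → Nat → Nat
  | 0, j => j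
  | fuel + 1, j =>
    if j < commands.length then
      if PySem.Chars.endswith (commands.getD j "").toList ['\"'] then j
      else pcB_find commands fuel (j + 1)
    else j

-- port of _collect_literal: (literal, index of the last token the literal consumed)
def pcB_lit (commands : List String) (i : Nat) (head : List Char) : List Char × Nat :=
  if PySem.Chars.endswith head ['\"'] then
    (PySem.List.slice head none (some (-1)), i)
  else
    if pcB_find commands commands.length (i + 1) < commands.length then
      (PySem.Chars.join [' ']
        (head :: (PySem.List.slice commands (some ((i : Int) + 1))
            (some (pcB_find commands commands.length (i + 1) : Int))).map String.toList
          ++ [PySem.List.slice (commands.getD (pcB_find commands commands.length (i + 1)) "").toList none (some (-1))]),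
       pcB_find commands commands.length (i + 1))
    else
      (PySem.Chars.join [' ']
        (head :: (PySem.List.slice commands (some ((i : Int) + 1)) none).map String.toList),
       commands.length - 1)

def pcB_loop (commands : List String) : Nat → Nat → List String →
    PySem.Dict Int (List Int) → Int → List String × List (Int × List Int)
  | 0, _, pre, strs, _ => (pre, strs.items)
  | fuel + 1, i, pre, strs, addr =>
    if i < commands.length then
      let command := commands.getD i ""
      if command == "do" then
        pcB_loop commands fuel (i + 1)
          (pre.dropLast.dropLast ++
            [String.ofList ((commands.getD (i - 2) "").toList ++ ' ' ::
              (commands.getD (i - 1) "").toList ++ [' ', 'd', 'o'])])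
          strs addr
      else if PySem.Chars.startswith command.toList ['.', '\"'] then
        let r := pcB_lit commands i (PySem.List.slice command.toList (some 2) none)
        pcB_loop commands fuel (r.2 + 1)
          (pre ++ [String.ofList (['P', 'S', 'T', 'R', ' '] ++ PySem.Int.toChars addr)])
          (strs.insert addr ((r.1.length : Int) :: r.1.map (fun c => (c.toNat : Int))))
          (addr + (r.1.length : Int) + 1)
      else pcB_loop commands fuel (i + 1) (pre ++ [command]) strs addr
    else (pre, strs.items)

def preprocess_commands_alt (commands : List String) : List String × (List (Int × List Int)) :=
  pcB_loop commands commands.length 0 [] PySem.Dict.empty 0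

-- ===== PRECONDITION & SPEC =====

-- helper of Pre_: scan the tokens left to right; inLit says the scan is inside an unfinished
-- string literal (skipping tokens up to the first one ending with '"'), h is how many pending
-- results precede the scan point; every "do" met outside a literal must find at least two
def pcOk : List String → Bool → Nat → Bool
  | [], _, _ => true
  | t :: rest, true, h => pcOk rest (!PySem.Chars.endswith t.toList ['\"']) h
  | t :: rest, false, h =>
    if t == "do" then decide (2 ≤ h) && pcOk rest false (h - 1)
    else if PySem.Chars.startswith t.toList ['.', '\"'] then
      if PySem.Chars.endswith (PySem.List.slice t.toList (some 2) none) ['\"'] then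
        pcOk rest false (h + 1)
      else pcOk rest true (h + 1)
    else pcOk rest false (h + 1)

-- Pre_ excludes exactly the inputs on which A raises: those where some "do" token (outside a
-- string literal) has fewer than two pending results before it (ValueError when it is at index
-- 0 or 1, IndexError from pop() otherwise); A returns normally on every input admitted here.
def Pre_preprocess_commands (commands : List String) : Prop := pcOk commands false 0 = true
instance (commands : List String) : Decidable (Pre_preprocess_commands commands) := by
  unfold Pre_preprocess_commands; infer_instance

def pvWitness_preprocess_commands : List String :=
  ["1", "10", "do", ".\"hello", "forth", "world\"", "loop"]

def Spec_preprocess_commands (commands : List String) (out : List String × (List (Int × List Int))) : Prop := out = preprocess_commands_alt commands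
instance (commands : List String) (out : List String × (List (Int × List Int))) : Decidable (Spec_preprocess_commands commands out) := by unfold Spec_preprocess_commands; infer_instance

-- ===== CLAIM (what is proved, stated in full; the proofs are below) =====
def Claim_equal_preprocess_commands : Prop := ∀ (commands : List String), Dom_preprocess_commands commands → Pre_preprocess_commands commands → Spec_preprocess_commands commands (preprocess_commands commands)

-- ===== LEMMAS AND PROOFS =====

theorem witness_ok :
    Dom_preprocess_commands pvWitness_preprocess_commands ∧
    Pre_preprocess_commands pvWitness_preprocess_commands := by
  constructor <;> decide

theorem pcB_find_ge (c : List String) : ∀ (f j : Nat), j ≤ pcB_find c f j := by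
  intro f
  induction f with
  | zero => intro j; simp [pcB_find]
  | succ f ih =>
      intro j
      simp only [pcB_find]
      split
      · split
        · omega
        · exact le_trans (by omega) (ih (j + 1))
      · omega

theorem pcB_find_le (c : List String) : ∀ (f j : Nat), j ≤ c.length → pcB_find c f j ≤ c.length := by
  intro f
  induction f with
  | zero => intro j h; simpa [pcB_find] using h
  | succ f ih =>
      intro j h
      simp only [pcB_find]
      split
      · split
        · omega
        · exact ih (j + 1) (by omega)
      · exact h

theorem pcB_find_of_ge (c : List String) : ∀ (f j : Nat), c.length ≤ j → pcB_find c f j = j := by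
  intro f
  induction f with
  | zero => intro j _; simp [pcB_find]
  | succ f _ => intro j h; simp only [pcB_find]; rw [if_neg (by omega)]

theorem pcB_find_stable (c : List String) :
    ∀ (f g j : Nat), c.length - j ≤ f → c.length - j ≤ g → pcB_find c f j = pcB_find c g j := by
  intro f
  induction f with
  | zero =>
      intro g j hf _
      rw [pcB_find, pcB_find_of_ge c g j (by omega)]
  | succ f ih =>
      intro g j hf hg
      by_cases hj : j < c.length
      · obtain ⟨g', rfl⟩ : ∃ g', g = g' + 1 := ⟨g - 1, by omega⟩
        simp only [pcB_find, if_pos hj]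
        split
        · rfl
        · exact ih g' (j + 1) (by omega) (by omega)
      · rw [pcB_find_of_ge c _ j (by omega), pcB_find_of_ge c g j (by omega)]

theorem pcB_find_endswith (c : List String) :
    ∀ (f j : Nat), c.length - j ≤ f → pcB_find c f j < c.length →
      PySem.Chars.endswith (c.getD (pcB_find c f j) "").toList ['\"'] = true := by
  intro f
  induction f with
  | zero =>
      intro j hf hlt
      rw [pcB_find] at hlt ⊢
      omega
  | succ f ih =>
      intro j hf hlt
      by_cases hj : j < c.length
      · rw [pcB_find, if_pos hj] at hlt ⊢
        by_cases he : PySem.Chars.endswith (c.getD j "").toList ['\"'] = true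
        · rw [if_pos he] at hlt ⊢; simpa [he]
        · rw [if_neg he] at hlt ⊢
          exact ih (j + 1) (by omega) hlt
      · rw [pcB_find_of_ge c _ j (by omega)] at hlt
        omega

-- A's inner while loop characterised by B's closing-token index
theorem pcA_inner_eq (c : List String) :
    ∀ (f i : Nat) (lit : List Char), c.length - (i + 1) ≤ f →
      pcA_inner c f i lit =
        (((c.drop (i + 1)).take (pcB_find c c.length (i + 1) - (i + 1))).foldl
            (fun acc t => acc ++ ' ' :: t.toList) lit,
          pcB_find c c.length (i + 1) - 1) := by
  intro f
  induction f with
  | zero =>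
      intro i lit hf
      have hge : c.length ≤ i + 1 := by omega
      rw [pcA_inner, pcB_find_of_ge c _ _ hge]
      simp
  | succ f ih =>
      intro i lit hf
      by_cases h : i + 1 < c.length ∧
          ¬ PySem.Chars.endswith (c.getD (i + 1) "").toList ['\"'] = true
      · rw [pcA_inner, if_pos h, ih (i + 1) _ (by omega)]
        have hfind : pcB_find c c.length (i + 1) = pcB_find c c.length (i + 2) := by
          obtain ⟨m, hm⟩ : ∃ m, c.length = m + 1 := ⟨c.length - 1, by omega⟩
          conv_lhs => rw [hm, pcB_find, if_pos (by omega : i + 1 < c.length),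
            if_neg (by simpa using h.2)]
          exact pcB_find_stable c m c.length (i + 2) (by omega) (by omega)
        have hge : i + 2 ≤ pcB_find c c.length (i + 2) := pcB_find_ge c c.length (i + 2)
        have hdrop : c.drop (i + 1) = c.getD (i + 1) "" :: c.drop (i + 2) := by
          rw [List.getD_eq_getElem c "" h.1]
          exact List.drop_eq_getElem_cons h.1
        rw [hfind, hdrop]
        have htake : pcB_find c c.length (i + 2) - (i + 1) =
            (pcB_find c c.length (i + 2) - (i + 2)) + 1 := by omega
        rw [htake, List.take_succ_cons, List.foldl_cons]
      · rw [pcA_inner, if_neg h]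
        rcases Nat.lt_or_ge (i + 1) c.length with h1 | h1
        · have h2 : PySem.Chars.endswith (c.getD (i + 1) "").toList ['\"'] = true := by
            by_contra hc
            exact h ⟨h1, by simpa using hc⟩
          have : pcB_find c c.length (i + 1) = i + 1 := by
            obtain ⟨m, hm⟩ : ∃ m, c.length = m + 1 := ⟨c.length - 1, by omega⟩
            rw [hm, pcB_find, if_pos (by omega : i + 1 < c.length), if_pos h2]
          simp [this]
        · have : pcB_find c c.length (i + 1) = i + 1 := pcB_find_of_ge c _ _ h1
          simp [this]

-- ' '.join(x :: xs) unfolded to x followed by a space before each further part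
theorem join_space (xs : List (List Char)) (x : List Char) :
    PySem.Chars.join [' '] (x :: xs) = x ++ xs.flatMap (fun t => ' ' :: t) := by
  induction xs generalizing x with
  | nil => simp [PySem.Chars.join_singleton]
  | cons y ys ih =>
      rw [PySem.Chars.join_cons_cons, ih y]
      simp

-- A's accumulating fold written as the leading part followed by space-prefixed tokens
theorem foldl_sp (ts : List String) (x : List Char) :
    ts.foldl (fun acc t => acc ++ ' ' :: t.toList) x =
      x ++ (ts.map String.toList).flatMap (fun t => ' ' :: t) := by
  induction ts generalizing x with
  | nil => simp
  | cons t ts ih => simp [List.foldl_cons, ih]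

-- the two loops agree from every state (both totalise the raising "do" states identically)
theorem loop_eq (c : List String) :
    ∀ (fuel i : Nat) (pre : List String) (strs : PySem.Dict Int (List Int)) (addr : Int),
      pcA_loop c fuel i pre strs addr = pcB_loop c fuel i pre strs addr := by
  intro fuel
  induction fuel with
  | zero => intro i pre strs addr; rw [pcA_loop, pcB_loop]
  | succ fuel ih =>
      intro i pre strs addr
      rw [pcA_loop, pcB_loop]
      by_cases hi : i < c.length
      · rw [if_pos hi, if_pos hi]
        by_cases hdoi : (c.getD i "" == "do") = true
        · simp only [hdoi, if_true]
          exact ih (i + 1) _ _ _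
        · simp only [hdoi]
          by_cases hst : PySem.Chars.startswith (c.getD i "").toList ['.', '\"'] = true
          · simp only [hst, if_true]
            set head := PySem.List.slice (c.getD i "").toList (some 2) none with hhead
            by_cases hq : PySem.Chars.endswith head ['\"'] = true
            · rw [pcB_lit, if_pos hq]
              simp only [hq, if_true]
              exact ih (i + 1) _ _ _
            · rw [pcB_lit, if_neg hq]
              simp only [hq]
              rw [pcA_inner_eq c c.length i head (by omega)]
              set j := pcB_find c c.length (i + 1) with hj
              have hge : i + 1 ≤ j := pcB_find_ge c c.length (i + 1)
              have hle : j ≤ c.length := pcB_find_le c c.length (i + 1) (by omega)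
              have hj1 : j - 1 + 1 = j := by omega
              by_cases hjn : j < c.length
              · have hend := pcB_find_endswith c c.length (i + 1) (by omega)
                  (by rw [← hj]; exact hjn)
                rw [← hj] at hend
                simp only [hj1, hjn, hend, and_self, if_true]
                have hlit :
                    ((c.drop (i + 1)).take (j - (i + 1))).foldl
                        (fun acc t => acc ++ ' ' :: t.toList) head ++
                      ' ' :: PySem.List.slice (c.getD j "").toList none (some (-1)) =
                    PySem.Chars.join [' ']
                      (head :: (PySem.List.slice c (some ((i : Int) + 1)) (some (j : Int))).map String.toList
                        ++ [PySem.List.slice (c.getD j "").toList none (some (-1))]) := by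
                  have hslice : PySem.List.slice c (some ((i : Int) + 1)) (some (j : Int)) =
                      (c.drop (i + 1)).take (j - (i + 1)) := by
                    have : ((i : Int) + 1) = ((i + 1 : Nat) : Int) := by push_cast; ring
                    rw [this, PySem.List.slice_natCast]
                  rw [hslice, List.cons_append, join_space, foldl_sp]
                  simp [List.flatMap_append]
                rw [hlit]
                exact ih (j + 1) _ _ _
              · have hjl : j = c.length := by omega
                have hcond : ¬ (j - 1 + 1 < c.length ∧
                    PySem.Chars.endswith (c.getD (j - 1 + 1) "").toList ['\"'] = true) := by
                  rw [hj1]; intro hc; exact absurd hc.1 hjn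
                rw [if_neg hcond, if_neg hjn]
                have hlit :
                    ((c.drop (i + 1)).take (j - (i + 1))).foldl
                        (fun acc t => acc ++ ' ' :: t.toList) head =
                    PySem.Chars.join [' ']
                      (head :: (PySem.List.slice c (some ((i : Int) + 1)) none).map String.toList) := by
                  have hslice : PySem.List.slice c (some ((i : Int) + 1)) none = c.drop (i + 1) := by
                    have : ((i : Int) + 1) = ((i + 1 : Nat) : Int) := by push_cast; ring
                    rw [this, PySem.List.slice_from_natCast]
                  have htake : (c.drop (i + 1)).take (j - (i + 1)) = c.drop (i + 1) := by
                    apply List.take_of_length_le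
                    simp [hjl]
                  rw [hslice, htake, join_space, foldl_sp]
                rw [hlit]
                have hidx : j - 1 + 1 = c.length - 1 + 1 := by omega
                rw [hidx]
                exact ih (c.length - 1 + 1) _ _ _
          · simp only [hst]
            exact ih (i + 1) _ _ _
      · rw [if_neg hi, if_neg hi]

-- ===== VERDICT (by name: the statement is the Claim_ definition above) =====
theorem preprocess_commands_spec : Claim_equal_preprocess_commands := by
  intro commands _ _
  unfold Spec_preprocess_commands preprocess_commands preprocess_commands_alt
  exact loop_eq commands commands.length 0 [] PySem.Dict.empty 0
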